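-- pv_equiv track=rewrite | github.com/ansonb/RECON | utils/context_utils.py | make_char_vocab
-- ===== SOURCE A (Python) =====
-- from collections import OrderedDict
--
-- def make_char_vocab(data):
--     char_vocab = OrderedDict()
--     char_vocab['<PAD>'] = 0
--     char_vocab['<UNK>'] = 1
--     char_idx = 2
--     for d in data:
--         for word in d['tokens']:
--             for c in word:
--                 if c not in char_vocab:
--                     char_vocab[c] = char_idx
--                     char_idx += 1
--
--     return char_vocab
-- ===== SOURCE B (Python) =====
-- from collections import OrderedDict
--
-- def make_char_vocab(data):
--     # Flatten once, then record each char's FIRST position by overwriting while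
--     # scanning the stream backwards; sort the chars by that position to recover
--     # first-seen order and assign ids 2, 3, ...
--     stream = [c for d in data for word in d['tokens'] for c in word]
--     first_pos = {}
--     for i in range(len(stream) - 1, -1, -1):
--         first_pos[stream[i]] = i
--     char_vocab = OrderedDict()
--     char_vocab['<PAD>'] = 0
--     char_vocab['<UNK>'] = 1
--     for idx, c in enumerate(sorted(first_pos, key=first_pos.get), start=2):
--         char_vocab[c] = idx
--     return char_vocab
-- ===== Notes on version B (the rewrite author's own statement) =====
-- stated objective: alternative
-- what changed: B flattens the tokens once, builds a char->first-position map by overwriting while scanning the flattened stream backwards, and then sorts the distinct chars by that position to assign ids from 2, instead of A's single membership-guarded counter pass.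
import Mathlib
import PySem

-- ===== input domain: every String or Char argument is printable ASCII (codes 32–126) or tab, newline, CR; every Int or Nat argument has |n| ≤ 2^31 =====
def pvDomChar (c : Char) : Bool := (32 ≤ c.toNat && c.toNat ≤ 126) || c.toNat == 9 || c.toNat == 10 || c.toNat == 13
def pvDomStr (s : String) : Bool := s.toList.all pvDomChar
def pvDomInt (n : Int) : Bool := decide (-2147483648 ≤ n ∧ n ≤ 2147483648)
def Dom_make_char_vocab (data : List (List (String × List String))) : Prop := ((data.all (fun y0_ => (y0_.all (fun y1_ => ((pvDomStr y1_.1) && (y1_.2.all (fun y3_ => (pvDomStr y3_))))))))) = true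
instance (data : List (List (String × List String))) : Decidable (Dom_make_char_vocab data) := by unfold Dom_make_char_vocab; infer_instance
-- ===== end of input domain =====

-- B flattens the tokens once, records each char's first position by overwriting while
-- scanning the flattened stream backwards, and sorts the chars by that position to
-- assign ids from 2 — a different algorithm, same result (alternative, not faster).

-- ===== PORT A =====
-- d['tokens']; the KeyError case (key absent) is excluded by Pre_ below, the default is never used there
def pvTokensA (d : List (String × List String)) : List String :=
  (PySem.Dict.mk d).getD "tokens" []

-- body of A's innermost loop: 'if c not in char_vocab: char_vocab[c] = char_idx; char_idx += 1'
def pvAStep (st : PySem.Dict String Int × Int) (c : Char) : PySem.Dict String Int × Int :=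
  if st.1.contains (String.singleton c) then st
  else (st.1.insert (String.singleton c) st.2, st.2 + 1)

def make_char_vocab (data : List (List (String × List String))) : List (String × Int) :=
  (data.foldl
    (fun st d => (pvTokensA d).foldl (fun st w => w.toList.foldl pvAStep st) st)
    (((PySem.Dict.empty.insert "<PAD>" 0).insert "<UNK>" 1), 2)).1.items

-- ===== PORT B =====
-- stream = [c for d in data for word in d['tokens'] for c in word]
def pvStreamB (data : List (List (String × List String))) : List Char :=
  data.flatMap (fun d => ((PySem.Dict.mk d).getD "tokens" []).flatMap (fun w => w.toList))

-- for i in range(len(stream)-1, -1, -1): first_pos[stream[i]] = i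
def pvFirstPos (stream : List Char) : PySem.Dict Char Int :=
  (PySem.List.pyRange ((stream.length : Int) - 1) (-1) (-1)).foldl
    (fun fp i =>
      match PySem.List.pyGet? stream i with
      | some c => fp.insert c i
      | none => fp)
    PySem.Dict.empty

def make_char_vocab_alt (data : List (List (String × List String))) : List (String × Int) :=
  let stream := pvStreamB data
  let fp := pvFirstPos stream
  let sortedChars := PySem.List.sorted fp.keys (fun c => fp.getD c 0)
  ("<PAD>", 0) :: ("<UNK>", 1) ::
    (PySem.List.enumerate sortedChars 2).map (fun p => (String.singleton p.2, p.1))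

-- ===== PRECONDITION & SPEC =====
-- Pre_ excludes exactly the inputs where some record lacks the 'tokens' key, on which Python A raises KeyError.
def Pre_make_char_vocab (data : List (List (String × List String))) : Prop :=
  (data.all (fun d => (PySem.Dict.mk d).contains "tokens")) = true
instance (data : List (List (String × List String))) : Decidable (Pre_make_char_vocab data) := by unfold Pre_make_char_vocab; infer_instance
def pvWitness_make_char_vocab : (List (List (String × List String))) := [[("tokens", ["ab", "ba"])]]

def Spec_make_char_vocab (data : List (List (String × List String))) (out : List (String × Int)) : Prop := out = make_char_vocab_alt data
instance (data : List (List (String × List String))) (out : List (String × Int)) : Decidable (Spec_make_char_vocab data out) := by unfold Spec_make_char_vocab; infer_instance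

-- ===== CLAIM (what is proved, stated in full; the proofs are below) =====
def Claim_equal_make_char_vocab : Prop := ∀ (data : List (List (String × List String))), Dom_make_char_vocab data → Pre_make_char_vocab data → Spec_make_char_vocab data (make_char_vocab data)

-- ===== LEMMAS AND PROOFS =====

-- first-seen accumulation of new characters onto a seen-list (A's dict's key set)
def pvAddAll (s : List Char) (cs : List Char) : List Char := cs.foldl PySem.Set.add s

-- the dictionary A has built after having seen exactly the distinct characters s (in order)
def pvVocabOf (s : List Char) : PySem.Dict String Int :=
  PySem.Dict.mk (("<PAD>", 0) :: ("<UNK>", 1) ::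
    (PySem.List.enumerate s 2).map (fun p => (String.singleton p.2, p.1)))

theorem pv_singleton_beq (c c' : Char) : (String.singleton c == String.singleton c') = (c == c') := by
  rcases h : c == c' with _ | _
  · apply beq_eq_false_iff_ne.mpr
    intro hs
    have : c = c' := by
      have := congrArg String.toList hs
      simpa [String.singleton] using this
    simp [this] at h
  · have : c = c' := by exact beq_iff_eq.mp h
    simp [this]

theorem pv_singleton_ne_pad (c : Char) : ("<PAD>" == String.singleton c) = false := by
  apply beq_eq_false_iff_ne.mpr
  intro hs
  have := congrArg String.toList hs
  simp [String.singleton] at this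

theorem pv_singleton_ne_unk (c : Char) : ("<UNK>" == String.singleton c) = false := by
  apply beq_eq_false_iff_ne.mpr
  intro hs
  have := congrArg String.toList hs
  simp [String.singleton] at this

theorem pv_any_enumerate (s : List Char) (c : Char) (n : Int) :
    (PySem.List.enumerate s n).any
      (fun p => String.singleton p.2 == String.singleton c) = decide (c ∈ s) := by
  induction s generalizing n with
  | nil => simp [PySem.List.enumerate]
  | cons x t ih =>
      simp only [PySem.List.enumerate_cons, List.any_cons, ih (n + 1)]
      simp only [pv_singleton_beq]
      rw [show (x == c) = decide (c = x) from by by_cases h : c = x <;> simp [h, Ne.symm]]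
      simp [List.mem_cons]

theorem pv_contains_vocabOf (s : List Char) (c : Char) :
    (pvVocabOf s).contains (String.singleton c) = decide (c ∈ s) := by
  simp [pvVocabOf, PySem.Dict.contains, Function.comp_def, pv_singleton_ne_pad,
    pv_singleton_ne_unk, pv_any_enumerate]

theorem pv_insert_vocabOf (s : List Char) (c : Char) (h : c ∉ s) :
    (pvVocabOf s).insert (String.singleton c) (2 + (s.length : Int)) = pvVocabOf (s ++ [c]) := by
  apply PySem.Dict.ext
  rw [PySem.Dict.items_insert_of_not_contains _ _ (by simp [pv_contains_vocabOf, h])]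
  simp [pvVocabOf, PySem.List.enumerate_append, PySem.List.enumerate_cons,
    PySem.List.enumerate_nil, add_comm]

theorem pv_loop (cs s : List Char) :
    cs.foldl pvAStep (pvVocabOf s, 2 + (s.length : Int)) =
      (pvVocabOf (pvAddAll s cs), 2 + ((pvAddAll s cs).length : Int)) := by
  induction cs generalizing s with
  | nil => simp [pvAddAll]
  | cons c t ih =>
      have hstep : pvAStep (pvVocabOf s, 2 + (s.length : Int)) c =
          (pvVocabOf (PySem.Set.add s c), 2 + ((PySem.Set.add s c).length : Int)) := by
        by_cases h : c ∈ s
        · simp [pvAStep, pv_contains_vocabOf, h, PySem.Set.add, PySem.Set.contains]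
        · simp only [pvAStep, pv_contains_vocabOf, h, decide_false, Bool.false_eq_true, if_false]
          rw [pv_insert_vocabOf s c h]
          simp [PySem.Set.add, PySem.Set.contains, h]
          ring
      simpa [pvAddAll, List.foldl_cons, hstep] using ih (PySem.Set.add s c)

theorem pv_A_flat (data : List (List (String × List String))) :
    make_char_vocab data = ((pvStreamB data).foldl pvAStep (pvVocabOf [], 2)).1.items := by
  have hinit : (((PySem.Dict.empty.insert "<PAD>" 0).insert "<UNK>" 1 : PySem.Dict String Int), (2 : Int)) =
      (pvVocabOf [], 2) := by decide
  rw [make_char_vocab, hinit, pvStreamB]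
  simp only [List.foldl_flatMap]
  rfl

-- ===== B-side lemmas =====

-- structural form of B's backward index loop: chars of s get positions k, k+1, …, later (deeper) inserts first
def pvRevDict : List Char → Int → PySem.Dict Char Int
  | [], _ => PySem.Dict.empty
  | c :: t, k => (pvRevDict t (k + 1)).insert c k

theorem pv_rev_foldr (full : List Char) (s pre : List Char) (h : full = pre ++ s) :
    (PySem.List.pyRange (pre.length : Int) (full.length : Int) 1).foldr
      (fun i fp =>
        match PySem.List.pyGet? full i with
        | some c => fp.insert c i
        | none => fp)
      PySem.Dict.empty
    = pvRevDict s (pre.length : Int) := by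
  induction s generalizing pre with
  | nil =>
      subst h
      rw [PySem.List.pyRange_one_eq_nil (by simp)]
      rfl
  | cons c t ih =>
      subst h
      have hlen : ((pre ++ c :: t).length : Int) = (pre.length : Int) + (t.length + 1 : Int) := by
        push_cast [List.length_append, List.length_cons]; ring
      have hlt : (pre.length : Int) < ((pre ++ c :: t).length : Int) := by rw [hlen]; omega
      rw [PySem.List.pyRange_one_cons hlt]
      rw [List.foldr_cons]
      have hpre' : ((pre.length : Int) + 1) = (((pre ++ [c]).length : Nat) : Int) := by
        simp
      have hih := ih (pre ++ [c]) (by simp)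
      rw [hpre', hih]
      have hget : PySem.List.pyGet? (pre ++ c :: t) ((pre.length : Nat) : Int) = some c := by
        rw [PySem.List.pyGet?_natCast]
        simp
      rw [hget]
      simp [pvRevDict]

theorem pv_firstPos_eq (stream : List Char) : pvFirstPos stream = pvRevDict stream 0 := by
  rw [pvFirstPos]
  have hr : PySem.List.pyRange ((stream.length : Int) - 1) (-1) (-1)
      = (PySem.List.pyRange 0 (stream.length : Int) 1).reverse := by
    rw [PySem.List.pyRange_neg_one_eq_reverse]
    norm_num
  rw [hr, List.foldl_reverse]
  have := pv_rev_foldr stream stream [] (by simp)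
  simpa using this

theorem pv_get_revDict (s : List Char) (k : Int) (c : Char) :
    (pvRevDict s k).get? c = if c ∈ s then some (k + (List.idxOf c s : Int)) else none := by
  induction s generalizing k with
  | nil => simp [pvRevDict, PySem.Dict.get?_empty]
  | cons c0 t ih =>
      by_cases h : c = c0
      · subst h
        simp [pvRevDict, PySem.Dict.get?_insert_self, List.idxOf_cons_self]
      · rw [pvRevDict, PySem.Dict.get?_insert_of_ne _ _ h, ih]
        by_cases hm : c ∈ t
        · rw [if_pos hm, if_pos (by simp [hm]), List.idxOf_cons_ne t (fun e => h e.symm)]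
          push_cast
          ring_nf
        · rw [if_neg hm, if_neg (by simp [h, hm])]

theorem pv_keys_revDict (s : List Char) (k : Int) :
    (∀ c, c ∈ (pvRevDict s k).keys ↔ c ∈ s) ∧ (pvRevDict s k).keys.Nodup := by
  induction s generalizing k with
  | nil =>
      constructor
      · intro c; simp [pvRevDict, PySem.Dict.keys, PySem.Dict.empty]
      · simp [pvRevDict, PySem.Dict.keys, PySem.Dict.empty]
  | cons c0 t ih =>
      obtain ⟨hmem, hnd⟩ := ih (k + 1)
      by_cases hc : (pvRevDict t (k + 1)).contains c0 = true
      · have hc0 : c0 ∈ t := (hmem c0).mp ((PySem.Dict.contains_iff_mem_keys _ _).mp hc)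
        rw [pvRevDict, PySem.Dict.keys_insert_of_contains _ _ hc]
        refine ⟨fun c => ?_, hnd⟩
        rw [hmem c]
        constructor
        · intro h; exact List.mem_cons_of_mem _ h
        · intro h
          rcases List.mem_cons.mp h with h | h
          · rw [h]; exact hc0
          · exact h
      · have hcf : (pvRevDict t (k + 1)).contains c0 = false := by
          cases h : (pvRevDict t (k + 1)).contains c0
          · rfl
          · exact absurd h hc
        have hc0 : c0 ∉ (pvRevDict t (k + 1)).keys := by
          intro h
          exact hc ((PySem.Dict.contains_iff_mem_keys _ _).mpr h)
        rw [pvRevDict, PySem.Dict.keys_insert_of_not_contains _ _ hcf]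
        constructor
        · intro c
          simp only [List.mem_append, hmem c, List.mem_cons]
          tauto
        · simp only [List.nodup_append, List.nodup_cons, List.nodup_nil]
          refine ⟨hnd, by simp, ?_⟩
          intro a hma b hb
          rw [List.mem_singleton] at hb
          subst hb
          exact fun he => hc0 (he ▸ hma)

theorem pv_dedup_pairwise (s : List Char) :
    (PySem.List.dedup s).Pairwise (fun a b => List.idxOf a s < List.idxOf b s) := by
  induction s using List.reverseRecOn with
  | nil => simp [PySem.List.dedup, PySem.Set.ofList]
  | append_singleton t c ih =>
      have hof : PySem.List.dedup (t ++ [c]) = PySem.Set.add (PySem.List.dedup t) c := by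
        simp [PySem.List.dedup, PySem.Set.ofList]
      have hmemd : ∀ a, a ∈ PySem.List.dedup t → a ∈ t := fun a h =>
        (PySem.Set.mem_ofList t a).mp h
      have hkeep : (PySem.List.dedup t).Pairwise
          (fun a b => List.idxOf a (t ++ [c]) < List.idxOf b (t ++ [c])) := by
        refine ih.imp_of_mem ?_
        intro a b ha hb hab
        rwa [List.idxOf_append_of_mem (hmemd a ha), List.idxOf_append_of_mem (hmemd b hb)]
      rw [hof, PySem.Set.add]
      by_cases hc : PySem.Set.contains (PySem.List.dedup t) c = true
      · rw [if_pos hc]; exact hkeep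
      · rw [if_neg hc]
        have hcnot : c ∉ t := by
          intro h
          apply hc
          simp only [PySem.List.dedup, PySem.Set.contains, List.contains_iff_mem]
          exact (PySem.Set.mem_ofList t c).mpr h
        rw [List.pairwise_append]
        refine ⟨hkeep, by simp, ?_⟩
        intro a ha b hb
        rw [List.mem_singleton] at hb
        subst hb
        rw [List.idxOf_append_of_mem (hmemd a ha), List.idxOf_append_of_notMem hcnot]
        have := List.idxOf_lt_length_of_mem (hmemd a ha)
        simp only [List.idxOf_cons_self]
        omega

theorem pv_sorted_keys (stream : List Char) :
    PySem.List.sorted (pvRevDict stream 0).keys (fun c => (pvRevDict stream 0).getD c 0)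
      = PySem.List.dedup stream := by
  apply PySem.List.sorted_eq_of_perm_of_pairwise_lt
  · show (PySem.Set.ofList stream).Perm (pvRevDict stream 0).keys
    rw [List.perm_ext_iff_of_nodup (PySem.Set.nodup_ofList stream) (pv_keys_revDict stream 0).2]
    intro a
    rw [PySem.Set.mem_ofList, (pv_keys_revDict stream 0).1 a]
  · have hp := pv_dedup_pairwise stream
    refine hp.imp_of_mem ?_
    intro a b ha hb hab
    have hma : a ∈ stream := (PySem.Set.mem_ofList stream a).mp ha
    have hmb : b ∈ stream := (PySem.Set.mem_ofList stream b).mp hb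
    simp only [PySem.Dict.getD, pv_get_revDict, if_pos hma, if_pos hmb, Option.getD_some]
    omega

-- ===== VERDICT (by name: the statement is the Claim_ definition above) =====
theorem make_char_vocab_spec : Claim_equal_make_char_vocab := by
  intro data _ _
  unfold Spec_make_char_vocab
  rw [pv_A_flat]
  have h2 : ((pvVocabOf [], (2 : Int)) : PySem.Dict String Int × Int) =
      (pvVocabOf [], 2 + (([] : List Char).length : Int)) := by simp
  rw [h2, pv_loop]
  show (pvVocabOf (pvAddAll [] (pvStreamB data))).items = _
  rw [make_char_vocab_alt]
  rw [pv_firstPos_eq, pv_sorted_keys]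
  rfl
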